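-- pv_equiv track=rewrite | github.com/vivarium-collective/vivarium-nfsim | pbg_nfsim/processes.py | _parse_bngl_text
-- ===== SOURCE A (Python) =====
-- def _parse_bngl_text(bngl_text):
--     """Parse a BNGL model text to extract observables, seed species, and molecule types.
--
--     Returns:
--         observable_names: list of observable names
--         obs_to_pattern: dict mapping observable name -> BNGL pattern
--         seed_pattern_to_param: dict mapping seed species pattern -> parameter name
--         simple_molecule_types: set of molecule type names with no internal states
--     """
--     observable_names = []
--     obs_to_pattern = {}
--     seed_pattern_to_param = {}
--     simple_molecule_types = set()
--
--     # Parse observables block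
--     in_observables = False
--     for line in bngl_text.splitlines():
--         stripped = line.strip()
--         if stripped == 'begin observables':
--             in_observables = True
--             continue
--         if stripped == 'end observables':
--             break
--         if in_observables and stripped and not stripped.startswith('#'):
--             parts = stripped.split()
--             if len(parts) >= 3:
--                 name = parts[1]
--                 pattern = parts[2]
--                 observable_names.append(name)
--                 obs_to_pattern[name] = pattern
--
--     # Parse seed species block
--     in_seeds = False
--     for line in bngl_text.splitlines():
--         stripped = line.strip()
--         if stripped == 'begin seed species':
--             in_seeds = True
--             continue
--         if stripped == 'end seed species':
--             break
--         if in_seeds and stripped and not stripped.startswith('#'):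
--             parts = stripped.split()
--             if len(parts) >= 2:
--                 pattern = parts[0]
--                 param = parts[1]
--                 seed_pattern_to_param[pattern] = param
--
--     # Parse molecule types block
--     in_mol_types = False
--     for line in bngl_text.splitlines():
--         stripped = line.strip()
--         if stripped == 'begin molecule types':
--             in_mol_types = True
--             continue
--         if stripped == 'end molecule types':
--             break
--         if in_mol_types and stripped and not stripped.startswith('#'):
--             mol_type = stripped
--             # Simple molecule type: Name() with no internal states (no ~)
--             if '~' not in mol_type and mol_type.endswith('()'):
--                 name = mol_type[:-2]
--                 simple_molecule_types.add(name)
--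
--     return observable_names, obs_to_pattern, seed_pattern_to_param, simple_molecule_types
-- ===== SOURCE B (Python) =====
-- def _parse_bngl_text(bngl_text):
--     """Single pass over the lines: three independent block state machines
--     (in/done flags per block) run concurrently instead of three separate scans."""
--     observable_names = []
--     obs_to_pattern = {}
--     seed_pattern_to_param = {}
--     simple_molecule_types = set()
--     in_obs = done_obs = False
--     in_seeds = done_seeds = False
--     in_mol = done_mol = False
--     for line in bngl_text.splitlines():
--         stripped = line.strip()
--         if not done_obs:
--             if stripped == 'begin observables':
--                 in_obs = True
--             elif stripped == 'end observables':
--                 done_obs = True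
--             elif in_obs and stripped and not stripped.startswith('#'):
--                 parts = stripped.split()
--                 if len(parts) >= 3:
--                     observable_names.append(parts[1])
--                     obs_to_pattern[parts[1]] = parts[2]
--         if not done_seeds:
--             if stripped == 'begin seed species':
--                 in_seeds = True
--             elif stripped == 'end seed species':
--                 done_seeds = True
--             elif in_seeds and stripped and not stripped.startswith('#'):
--                 parts = stripped.split()
--                 if len(parts) >= 2:
--                     seed_pattern_to_param[parts[0]] = parts[1]
--         if not done_mol:
--             if stripped == 'begin molecule types':
--                 in_mol = True
--             elif stripped == 'end molecule types':
--                 done_mol = True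
--             elif in_mol and stripped and not stripped.startswith('#'):
--                 if '~' not in stripped and stripped.endswith('()'):
--                     simple_molecule_types.add(stripped[:-2])
--     return observable_names, obs_to_pattern, seed_pattern_to_param, simple_molecule_types
-- ===== Notes on version B (the rewrite author's own statement) =====
-- stated objective: alternative
-- what changed: A scans the full line list three times, once per block; B makes a single pass over the lines running three independent block state machines with in/done flags, the done flag reproducing each pass's break.
import Mathlib
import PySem

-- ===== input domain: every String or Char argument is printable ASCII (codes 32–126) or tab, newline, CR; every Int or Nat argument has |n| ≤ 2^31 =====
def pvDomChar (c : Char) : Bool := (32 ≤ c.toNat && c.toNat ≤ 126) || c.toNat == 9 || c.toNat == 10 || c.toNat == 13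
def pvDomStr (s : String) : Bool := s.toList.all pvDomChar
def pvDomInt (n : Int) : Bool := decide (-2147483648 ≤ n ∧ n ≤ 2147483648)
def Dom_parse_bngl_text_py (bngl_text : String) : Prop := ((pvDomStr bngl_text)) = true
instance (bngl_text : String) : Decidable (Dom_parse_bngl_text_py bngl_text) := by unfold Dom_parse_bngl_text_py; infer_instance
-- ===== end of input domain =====

-- B replaces A's three separate scans of the lines by ONE pass running three
-- independent block state machines (in/done flags per block); return value unchanged.

-- ===== PORT A =====
-- A's first loop: observables pass (break at 'end observables' = return)
def obsLoopA : List String → Bool → List String → PySem.Dict String String →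
    List String × PySem.Dict String String
  | [], _, names, d => (names, d)
  | line :: rest, inObs, names, d =>
    let st := PySem.Str.strip line
    if st == "begin observables" then obsLoopA rest true names d
    else if st == "end observables" then (names, d)
    else if inObs && !(st == "") && !(PySem.Str.startswith st "#") then
      let parts := PySem.Str.split₀ st
      if 3 ≤ parts.length then
        obsLoopA rest inObs (names ++ [PySem.List.pyGetD parts 1 ""])
          (d.insert (PySem.List.pyGetD parts 1 "") (PySem.List.pyGetD parts 2 ""))
      else obsLoopA rest inObs names d
    else obsLoopA rest inObs names d

-- A's second loop: seed species pass
def seedLoopA : List String → Bool → PySem.Dict String String → PySem.Dict String String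
  | [], _, d => d
  | line :: rest, inS, d =>
    let st := PySem.Str.strip line
    if st == "begin seed species" then seedLoopA rest true d
    else if st == "end seed species" then d
    else if inS && !(st == "") && !(PySem.Str.startswith st "#") then
      let parts := PySem.Str.split₀ st
      if 2 ≤ parts.length then
        seedLoopA rest inS (d.insert (PySem.List.pyGetD parts 0 "") (PySem.List.pyGetD parts 1 ""))
      else seedLoopA rest inS d
    else seedLoopA rest inS d

-- A's third loop: molecule types pass
def molLoopA : List String → Bool → PySem.Set String → PySem.Set String
  | [], _, s => s
  | line :: rest, inM, s =>
    let st := PySem.Str.strip line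
    if st == "begin molecule types" then molLoopA rest true s
    else if st == "end molecule types" then s
    else if inM && !(st == "") && !(PySem.Str.startswith st "#") then
      if !(PySem.Str.isIn "~" st) && PySem.Str.endswith st "()" then
        molLoopA rest inM (PySem.Set.add s (PySem.Str.slice st none (some (-2))))
      else molLoopA rest inM s
    else molLoopA rest inM s

def parse_bngl_text_py (bngl_text : String) :
    List String × (List (String × String)) × (List (String × String)) × List String :=
  let lines := PySem.Str.splitlines bngl_text
  let (names, obsD) := obsLoopA lines false [] PySem.Dict.empty
  let seedD := seedLoopA lines false PySem.Dict.empty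
  let mols := molLoopA lines false PySem.Set.empty
  (names, obsD.items, seedD.items, mols)

-- ===== PORT B =====
-- one step of the observables machine (state: in-flag, done-flag, names, dict)
def stepObsB (s : Bool × Bool × List String × PySem.Dict String String) (st : String) :
    Bool × Bool × List String × PySem.Dict String String :=
  match s with
  | (inO, dO, names, d) =>
    if dO then (inO, dO, names, d)
    else if st == "begin observables" then (true, dO, names, d)
    else if st == "end observables" then (inO, true, names, d)
    else if inO && !(st == "") && !(PySem.Str.startswith st "#") then
      let parts := PySem.Str.split₀ st
      if 3 ≤ parts.length then
        (inO, dO, names ++ [PySem.List.pyGetD parts 1 ""],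
          d.insert (PySem.List.pyGetD parts 1 "") (PySem.List.pyGetD parts 2 ""))
      else (inO, dO, names, d)
    else (inO, dO, names, d)

-- one step of the seed-species machine
def stepSeedB (s : Bool × Bool × PySem.Dict String String) (st : String) :
    Bool × Bool × PySem.Dict String String :=
  match s with
  | (inS, dS, d) =>
    if dS then (inS, dS, d)
    else if st == "begin seed species" then (true, dS, d)
    else if st == "end seed species" then (inS, true, d)
    else if inS && !(st == "") && !(PySem.Str.startswith st "#") then
      let parts := PySem.Str.split₀ st
      if 2 ≤ parts.length then
        (inS, dS, d.insert (PySem.List.pyGetD parts 0 "") (PySem.List.pyGetD parts 1 ""))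
      else (inS, dS, d)
    else (inS, dS, d)

-- one step of the molecule-types machine
def stepMolB (s : Bool × Bool × PySem.Set String) (st : String) :
    Bool × Bool × PySem.Set String :=
  match s with
  | (inM, dM, mols) =>
    if dM then (inM, dM, mols)
    else if st == "begin molecule types" then (true, dM, mols)
    else if st == "end molecule types" then (inM, true, mols)
    else if inM && !(st == "") && !(PySem.Str.startswith st "#") then
      if !(PySem.Str.isIn "~" st) && PySem.Str.endswith st "()" then
        (inM, dM, PySem.Set.add mols (PySem.Str.slice st none (some (-2))))
      else (inM, dM, mols)
    else (inM, dM, mols)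

def parse_bngl_text_py_alt (bngl_text : String) :
    List String × (List (String × String)) × (List (String × String)) × List String :=
  let fin := (PySem.Str.splitlines bngl_text).foldl
    (fun s line =>
      let st := PySem.Str.strip line
      (stepObsB s.1 st, stepSeedB s.2.1 st, stepMolB s.2.2 st))
    ((false, false, [], PySem.Dict.empty), (false, false, PySem.Dict.empty),
      (false, false, PySem.Set.empty))
  (fin.1.2.2.1, fin.1.2.2.2.items, fin.2.1.2.2.items, fin.2.2.2.2)

-- ===== PRECONDITION & SPEC =====
def Spec_parse_bngl_text_py (bngl_text : String) (out : List String × (List (String × String)) × (List (String × String)) × List String) : Prop := out = parse_bngl_text_py_alt bngl_text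
instance (bngl_text : String) (out : List String × (List (String × String)) × (List (String × String)) × List String) : Decidable (Spec_parse_bngl_text_py bngl_text out) := by unfold Spec_parse_bngl_text_py; infer_instance

-- ===== CLAIM (what is proved, stated in full; the proofs are below) =====
def Claim_equal_parse_bngl_text_py : Prop := ∀ (bngl_text : String), Dom_parse_bngl_text_py bngl_text → Spec_parse_bngl_text_py bngl_text (parse_bngl_text_py bngl_text)

-- ===== LEMMAS AND PROOFS =====

-- one step of each machine with the done-flag clear (definitional unfoldings)
theorem stepObsB_false (i : Bool) (n : List String) (d : PySem.Dict String String) (st : String) :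
    stepObsB (i, false, n, d) st =
      (if st == "begin observables" then ((true : Bool), (false : Bool), n, d)
       else if st == "end observables" then (i, true, n, d)
       else if i && !(st == "") && !(PySem.Str.startswith st "#") then
         (if 3 ≤ (PySem.Str.split₀ st).length then
            (i, false, n ++ [PySem.List.pyGetD (PySem.Str.split₀ st) 1 ""],
              d.insert (PySem.List.pyGetD (PySem.Str.split₀ st) 1 "")
                (PySem.List.pyGetD (PySem.Str.split₀ st) 2 ""))
          else (i, false, n, d))
       else (i, false, n, d)) := rfl

theorem stepSeedB_false (i : Bool) (d : PySem.Dict String String) (st : String) :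
    stepSeedB (i, false, d) st =
      (if st == "begin seed species" then ((true : Bool), (false : Bool), d)
       else if st == "end seed species" then (i, true, d)
       else if i && !(st == "") && !(PySem.Str.startswith st "#") then
         (if 2 ≤ (PySem.Str.split₀ st).length then
            (i, false, d.insert (PySem.List.pyGetD (PySem.Str.split₀ st) 0 "")
              (PySem.List.pyGetD (PySem.Str.split₀ st) 1 ""))
          else (i, false, d))
       else (i, false, d)) := rfl

theorem stepMolB_false (i : Bool) (s : PySem.Set String) (st : String) :
    stepMolB (i, false, s) st =
      (if st == "begin molecule types" then ((true : Bool), (false : Bool), s)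
       else if st == "end molecule types" then (i, true, s)
       else if i && !(st == "") && !(PySem.Str.startswith st "#") then
         (if !(PySem.Str.isIn "~" st) && PySem.Str.endswith st "()" then
            (i, false, PySem.Set.add s (PySem.Str.slice st none (some (-2))))
          else (i, false, s))
       else (i, false, s)) := rfl

-- the fused fold is the product of the three per-machine folds
theorem fuse_fold (lines : List String)
    (a : Bool × Bool × List String × PySem.Dict String String)
    (b : Bool × Bool × PySem.Dict String String)
    (c : Bool × Bool × PySem.Set String) :
    lines.foldl
      (fun s line =>
        let st := PySem.Str.strip line
        (stepObsB s.1 st, stepSeedB s.2.1 st, stepMolB s.2.2 st)) (a, b, c)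
    = (lines.foldl (fun x l => stepObsB x (PySem.Str.strip l)) a,
       lines.foldl (fun x l => stepSeedB x (PySem.Str.strip l)) b,
       lines.foldl (fun x l => stepMolB x (PySem.Str.strip l)) c) := by
  induction lines generalizing a b c with
  | nil => rfl
  | cons l rest ih => simp only [List.foldl]; exact ih _ _ _

-- a machine whose done-flag is set never moves again
theorem obs_fold_done (lines : List String) (i : Bool) (n : List String)
    (d : PySem.Dict String String) :
    lines.foldl (fun x l => stepObsB x (PySem.Str.strip l)) (i, true, n, d) = (i, true, n, d) := by
  induction lines with
  | nil => rfl
  | cons l rest ih => simpa [List.foldl, stepObsB] using ih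

theorem seed_fold_done (lines : List String) (i : Bool) (d : PySem.Dict String String) :
    lines.foldl (fun x l => stepSeedB x (PySem.Str.strip l)) (i, true, d) = (i, true, d) := by
  induction lines with
  | nil => rfl
  | cons l rest ih => simpa [List.foldl, stepSeedB] using ih

theorem mol_fold_done (lines : List String) (i : Bool) (s : PySem.Set String) :
    lines.foldl (fun x l => stepMolB x (PySem.Str.strip l)) (i, true, s) = (i, true, s) := by
  induction lines with
  | nil => rfl
  | cons l rest ih => simpa [List.foldl, stepMolB] using ih

-- A's pass with break = B's machine fold started with done = false
theorem obs_pass_eq (lines : List String) (i : Bool) (n : List String)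
    (d : PySem.Dict String String) :
    obsLoopA lines i n d
      = ((lines.foldl (fun x l => stepObsB x (PySem.Str.strip l)) (i, false, n, d)).2.2.1,
         (lines.foldl (fun x l => stepObsB x (PySem.Str.strip l)) (i, false, n, d)).2.2.2) := by
  induction lines generalizing i n d with
  | nil => rfl
  | cons l rest ih =>
    simp only [obsLoopA, List.foldl_cons, stepObsB_false]
    by_cases h1 : PySem.Str.strip l == "begin observables"
    · simp only [h1, if_true, ih]
    · by_cases h2 : PySem.Str.strip l == "end observables"
      · simp only [h1, h2, if_true, Bool.false_eq_true, if_false, obs_fold_done]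
      · by_cases h3 : (i && !(PySem.Str.strip l == "") && !(PySem.Str.startswith (PySem.Str.strip l) "#")) = true
        · by_cases h4 : 3 ≤ (PySem.Str.split₀ (PySem.Str.strip l)).length
          · simp only [h1, h2, h3, h4, Bool.false_eq_true, if_false, if_true, ih]
          · simp only [h1, h2, h3, h4, Bool.false_eq_true, if_false, if_true, ih]
        · simp only [h1, h2, h3, Bool.false_eq_true, if_false, ih]

theorem seed_pass_eq (lines : List String) (i : Bool) (d : PySem.Dict String String) :
    seedLoopA lines i d
      = (lines.foldl (fun x l => stepSeedB x (PySem.Str.strip l)) (i, false, d)).2.2 := by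
  induction lines generalizing i d with
  | nil => rfl
  | cons l rest ih =>
    simp only [seedLoopA, List.foldl_cons, stepSeedB_false]
    by_cases h1 : PySem.Str.strip l == "begin seed species"
    · simp only [h1, if_true, ih]
    · by_cases h2 : PySem.Str.strip l == "end seed species"
      · simp only [h1, h2, if_true, Bool.false_eq_true, if_false, seed_fold_done]
      · by_cases h3 : (i && !(PySem.Str.strip l == "") && !(PySem.Str.startswith (PySem.Str.strip l) "#")) = true
        · by_cases h4 : 2 ≤ (PySem.Str.split₀ (PySem.Str.strip l)).length
          · simp only [h1, h2, h3, h4, Bool.false_eq_true, if_false, if_true, ih]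
          · simp only [h1, h2, h3, h4, Bool.false_eq_true, if_false, if_true, ih]
        · simp only [h1, h2, h3, Bool.false_eq_true, if_false, ih]

theorem mol_pass_eq (lines : List String) (i : Bool) (s : PySem.Set String) :
    molLoopA lines i s
      = (lines.foldl (fun x l => stepMolB x (PySem.Str.strip l)) (i, false, s)).2.2 := by
  induction lines generalizing i s with
  | nil => rfl
  | cons l rest ih =>
    simp only [molLoopA, List.foldl_cons, stepMolB_false]
    by_cases h1 : PySem.Str.strip l == "begin molecule types"
    · simp only [h1, if_true, ih]
    · by_cases h2 : PySem.Str.strip l == "end molecule types"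
      · simp only [h1, h2, if_true, Bool.false_eq_true, if_false, mol_fold_done]
      · by_cases h3 : (i && !(PySem.Str.strip l == "") && !(PySem.Str.startswith (PySem.Str.strip l) "#")) = true
        · by_cases h4 : (!(PySem.Str.isIn "~" (PySem.Str.strip l)) && PySem.Str.endswith (PySem.Str.strip l) "()") = true
          · simp only [h1, h2, h3, h4, Bool.false_eq_true, if_false, if_true, ih]
          · simp only [h1, h2, h3, h4, Bool.false_eq_true, if_false, if_true, ih]
        · simp only [h1, h2, h3, Bool.false_eq_true, if_false, ih]

-- ===== VERDICT (by name: the statement is the Claim_ definition above) =====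
theorem parse_bngl_text_py_spec : Claim_equal_parse_bngl_text_py := by
  intro t _
  unfold Spec_parse_bngl_text_py parse_bngl_text_py parse_bngl_text_py_alt
  rw [fuse_fold]
  simp only [obs_pass_eq, seed_pass_eq, mol_pass_eq]
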